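-- pv_equiv track=rewrite | github.com/gianpena/AoC25 | day-1/2.py | f
-- ===== SOURCE A (Python) =====
-- def f(p,t,dir):
--     if t == 0: return 0
--     if p == 0:
--         return abs(t) // 100
--     elif dir == 'L':
--         next_position = max(p-t, 0) % 100
--         return (next_position == 0) + f(next_position, t - min(p,t), 'L')
--     else:
--         next_position = min(p+t, 100) % 100
--         return (next_position == 0) + f(next_position, t - min(100 - p, t), 'R')
-- ===== SOURCE B (Python) =====
-- def f(p, t, dir):
--     # Closed form: A's recursion always bottoms out after at most two steps,
--     # so the count is computable directly by arithmetic case analysis.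
--     if t == 0:
--         return 0
--     if p == 0:
--         return abs(t) // 100
--     if dir == 'L':
--         if p <= t:
--             return 1 + (t - p) // 100
--         return 1 if (p - t) % 100 == 0 else 0
--     if p + t >= 100:
--         return 1 + (p + t - 100) // 100
--     return 1 if (p + t) % 100 == 0 else 0
-- ===== Notes on version B (the rewrite author's own statement) =====
-- stated objective: alternative
-- what changed: Replaced A's self-recursion by a recursion-free closed-form arithmetic case analysis (the recursion always bottoms out after at most two steps, so each case is resolved to a direct formula).
import Mathlib
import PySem

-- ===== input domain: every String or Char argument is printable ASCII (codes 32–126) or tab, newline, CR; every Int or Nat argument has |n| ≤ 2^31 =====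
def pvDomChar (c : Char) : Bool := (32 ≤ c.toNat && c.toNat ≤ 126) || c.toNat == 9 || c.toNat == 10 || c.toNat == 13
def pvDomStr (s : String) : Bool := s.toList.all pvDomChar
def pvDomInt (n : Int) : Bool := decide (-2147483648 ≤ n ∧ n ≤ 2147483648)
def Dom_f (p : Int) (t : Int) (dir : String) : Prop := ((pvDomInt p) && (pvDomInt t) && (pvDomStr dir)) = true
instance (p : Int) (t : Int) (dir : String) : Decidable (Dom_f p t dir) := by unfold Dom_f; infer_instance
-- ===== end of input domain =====

-- B replaces A's recursion by a recursion-free closed-form case analysis (alternative decomposition, same cost).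

-- ===== PORT A =====
-- literal transliteration of A's recursion. The recursion is given fuel 3 purely as a
-- totality guard: each recursive call drives t or the position to 0, so every run
-- returns within 3 steps and the fuel-exhausted branch is never reached.
def fGo : Nat → Int → Int → String → Int
  | 0, _, _, _ => 0
  | fuel + 1, p, t, dir =>
    if t = 0 then 0
    else if p = 0 then PySem.Int.floordiv |t| 100
    else if dir = "L" then
      let next_position := PySem.Int.mod (max (p - t) 0) 100
      (if next_position = 0 then (1 : Int) else 0) + fGo fuel next_position (t - min p t) "L"
    else
      let next_position := PySem.Int.mod (min (p + t) 100) 100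
      (if next_position = 0 then (1 : Int) else 0) + fGo fuel next_position (t - min (100 - p) t) "R"

def f (p : Int) (t : Int) (dir : String) : Int := fGo 3 p t dir

-- ===== PORT B =====
-- Source B: straight-line closed form, no recursion or loop
def f_alt (p : Int) (t : Int) (dir : String) : Int :=
  if t = 0 then 0
  else if p = 0 then PySem.Int.floordiv |t| 100
  else if dir = "L" then
    if p ≤ t then 1 + PySem.Int.floordiv (t - p) 100
    else if PySem.Int.mod (p - t) 100 = 0 then 1 else 0
  else
    if 100 ≤ p + t then 1 + PySem.Int.floordiv (p + t - 100) 100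
    else if PySem.Int.mod (p + t) 100 = 0 then 1 else 0

-- ===== PRECONDITION & SPEC =====
def Spec_f (p : Int) (t : Int) (dir : String) (out : Int) : Prop := out = f_alt p t dir
instance (p : Int) (t : Int) (dir : String) (out : Int) : Decidable (Spec_f p t dir out) := by unfold Spec_f; infer_instance

-- ===== CLAIM (what is proved, stated in full; the proofs are below) =====
def Claim_equal_f : Prop := ∀ (p : Int) (t : Int) (dir : String), Dom_f p t dir → Spec_f p t dir (f p t dir)

-- ===== LEMMAS AND PROOFS =====

theorem pymod_zero (b : Int) : PySem.Int.mod 0 b = 0 := by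
  simp [PySem.Int.mod]

-- second-level call with position 0: A returns the bulk count
theorem fGo2_zero (t : Int) (dir : String) :
    fGo 2 0 t dir = PySem.Int.floordiv |t| 100 := by
  show fGo (1 + 1) 0 t dir = _
  rw [fGo]
  by_cases h : t = 0
  · subst h; simp [PySem.Int.floordiv]
  · rw [if_neg h, if_pos rfl]

-- second-level call with remaining steps 0: A returns 0
theorem fGo2_t0 (p : Int) (dir : String) : fGo 2 p 0 dir = 0 := by
  show fGo (1 + 1) p 0 dir = _
  rw [fGo, if_pos rfl]

theorem main_eq (p t : Int) (dir : String) : fGo 3 p t dir = f_alt p t dir := by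
  show fGo (2 + 1) p t dir = _
  rw [fGo, f_alt]
  by_cases h1 : t = 0
  · rw [if_pos h1, if_pos h1]
  rw [if_neg h1, if_neg h1]
  by_cases h2 : p = 0
  · rw [if_pos h2, if_pos h2]
  rw [if_neg h2, if_neg h2]
  by_cases h3 : dir = "L"
  · rw [if_pos h3, if_pos h3]
    show (if PySem.Int.mod (max (p - t) 0) 100 = 0 then (1 : Int) else 0)
        + fGo 2 (PySem.Int.mod (max (p - t) 0) 100) (t - min p t) "L" = _
    by_cases h4 : p ≤ t
    · -- crossing reached: next position 0, remaining steps t - p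
      have hmax : max (p - t) 0 = 0 := by omega
      have hmin : min p t = p := by omega
      rw [if_pos h4, hmax, hmin, pymod_zero, if_pos rfl, fGo2_zero,
          abs_of_nonneg (by omega : (0 : Int) ≤ t - p)]
    · -- steps exhausted before reaching 0
      have hmax : max (p - t) 0 = p - t := by omega
      have hmin : min p t = t := by omega
      rw [if_neg h4, hmax, hmin, sub_self, fGo2_t0, add_zero]
  · rw [if_neg h3, if_neg h3]
    show (if PySem.Int.mod (min (p + t) 100) 100 = 0 then (1 : Int) else 0)
        + fGo 2 (PySem.Int.mod (min (p + t) 100) 100) (t - min (100 - p) t) "R" = _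
    by_cases h4 : 100 ≤ p + t
    · -- boundary 100 reached: next position 0, remaining steps p + t - 100
      have hmin1 : min (p + t) 100 = 100 := by omega
      have hmin2 : min (100 - p) t = 100 - p := by omega
      have hmod : PySem.Int.mod 100 100 = 0 := by decide
      rw [if_pos h4, hmin1, hmin2, hmod, if_pos rfl, fGo2_zero,
          (by ring : t - (100 - p) = p + t - 100),
          abs_of_nonneg (by omega : (0 : Int) ≤ p + t - 100)]
    · -- steps exhausted before reaching 100
      have hmin1 : min (p + t) 100 = p + t := by omega
      have hmin2 : min (100 - p) t = t := by omega
      rw [if_neg h4, hmin1, hmin2, sub_self, fGo2_t0, add_zero]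

-- ===== VERDICT (by name: the statement is the Claim_ definition above) =====
theorem f_spec : Claim_equal_f := by
  intro p t dir _
  unfold Spec_f f
  exact main_eq p t dir
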